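-- pv_equiv track=rewrite | github.com/ku-alps/sw17_hongin | exercise/01BOJ9375패션왕신해빈.py | newmask
-- ===== SOURCE A (Python) =====
-- def newmask(i):
-- 	mask = 0
-- 	digit = 0
-- 	while i > 0:
-- 		if i & 1 == 1:
-- 			mask = mask|(31<<(5*digit))
-- 		else:
-- 			mask = mask|(0<<(5*digit))
-- 		i = i >> 1
-- 		digit +=1
-- 	return mask
-- ===== SOURCE B (Python) =====
-- def newmask(i):
--     # MSB-first fold over the binary string: each bit contributes a 5-bit block.
--     if i <= 0:
--         return 0
--     mask = 0
--     for c in bin(i)[2:]: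
--         mask = mask * 32 + (31 if c == '1' else 0)
--     return mask
-- ===== Notes on version B (the rewrite author's own statement) =====
-- stated objective: alternative
-- what changed: Instead of an LSB-first loop that ORs a shifted five-bit block into an accumulated mask with an explicit digit counter, B walks the binary string of i MSB-first and builds the result positionally by multiply-accumulate, with no bitwise operations and no shift counter.
import Mathlib
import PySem

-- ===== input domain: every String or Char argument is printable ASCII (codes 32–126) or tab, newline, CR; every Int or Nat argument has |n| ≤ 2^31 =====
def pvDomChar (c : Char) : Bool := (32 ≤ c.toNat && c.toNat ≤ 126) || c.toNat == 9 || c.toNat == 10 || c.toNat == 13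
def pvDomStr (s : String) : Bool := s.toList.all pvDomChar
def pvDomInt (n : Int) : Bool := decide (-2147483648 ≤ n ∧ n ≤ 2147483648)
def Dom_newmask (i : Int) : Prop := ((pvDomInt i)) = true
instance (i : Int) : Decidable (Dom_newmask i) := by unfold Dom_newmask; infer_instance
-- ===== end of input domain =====

-- B changes the decomposition: MSB-first multiply-accumulate over the binary string instead of
-- A's LSB-first shift/OR mask accumulation (objective: alternative, same asymptotic cost).

-- ===== PORT A =====
-- the while loop of A: state (i, mask, digit); Python's `i >> 1`/`<<`/`|`/`&` are ported with
-- core `>>>`/`<<<` (Nat shift amount; 5*digit is always ≥ 0 here) and PySem.Int.bor/band.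
def newmaskLoop (i mask digit : Int) : Int :=
  if 0 < i then
    newmaskLoop (i >>> (1 : Nat))
      (if PySem.Int.band i 1 = 1 then PySem.Int.bor mask ((31 : Int) <<< (5 * digit).toNat)
       else PySem.Int.bor mask ((0 : Int) <<< (5 * digit).toNat))
      (digit + 1)
  else mask
termination_by i.toNat
decreasing_by
  rw [Int.shiftRight_eq_div_pow]
  omega

def newmask (i : Int) : Int := newmaskLoop i 0 0

-- ===== PORT B =====
-- for i > 0, PySem.Int.toBinChars i is exactly Python's bin(i)[2:]
def newmask_alt (i : Int) : Int :=
  if i ≤ 0 then 0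
  else (PySem.Int.toBinChars i).foldl (fun mask c => mask * 32 + (if c = '1' then 31 else 0)) 0

-- ===== PRECONDITION & SPEC =====
def Spec_newmask (i : Int) (out : Int) : Prop := out = newmask_alt i
instance (i : Int) (out : Int) : Decidable (Spec_newmask i out) := by unfold Spec_newmask; infer_instance

-- ===== CLAIM (what is proved, stated in full; the proofs are below) =====
def Claim_equal_newmask : Prop := ∀ (i : Int), Dom_newmask i → Spec_newmask i (newmask i)

-- ===== LEMMAS AND PROOFS =====

-- abstract spec: each binary digit of n becomes a 5-bit block (31 or 0)
def pvSpread (n : Nat) : Nat :=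
  if n = 0 then 0 else 32 * pvSpread (n / 2) + 31 * (n % 2)
decreasing_by exact Nat.div_lt_self (by omega) (by omega)

lemma pvSpread_eq (n : Nat) (hn : n ≠ 0) :
    pvSpread n = 32 * pvSpread (n / 2) + 31 * (n % 2) := by
  rw [pvSpread, if_neg hn]

-- OR with a value shifted past the low k bits is addition
lemma pv_lor_mul_pow (k : ℕ) : ∀ a b : ℕ, a < 2 ^ k → a ||| b * 2 ^ k = a + b * 2 ^ k := by
  induction k with
  | zero =>
      intro a b h
      interval_cases a
      simp
  | succ k ih =>
      intro a b h
      have hb1 : Nat.bit (decide (a % 2 = 1)) (a / 2) = a := by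
        rcases Nat.mod_two_eq_zero_or_one a with h2 | h2 <;> simp [Nat.bit_val, h2] <;> omega
      have hb2 : Nat.bit false (b * 2 ^ k) = b * 2 ^ (k + 1) := by
        simp [Nat.bit_val, pow_succ]; ring
      rw [← hb1, ← hb2, Nat.lor_bit, ih (a / 2) b (by omega)]
      simp [Nat.bit_val]
      rcases Nat.mod_two_eq_zero_or_one a with h2 | h2 <;> simp [h2] <;> omega

lemma pv_loopA (n : Nat) : ∀ mask d : Nat, mask < 32 ^ d →
    newmaskLoop (n : Int) (mask : Int) (d : Int) = ((mask + 32 ^ d * pvSpread n : Nat) : Int) := by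
  induction n using Nat.strong_induction_on with
  | _ n ih =>
    intro mask d hm
    rw [newmaskLoop]
    by_cases hn : n = 0
    · subst hn
      simp [pvSpread]
    · have hpos : (0 : Int) < (n : Int) := by exact_mod_cast Nat.pos_of_ne_zero hn
      rw [if_pos hpos]
      have hshift : ((n : Int) >>> (1 : Nat)) = ((n / 2 : Nat) : Int) := by
        rw [Int.shiftRight_eq_div_pow]
        norm_num
      have hband : PySem.Int.band (n : Int) 1 = ((n % 2 : Nat) : Int) := by
        have : ((1 : Nat) : Int) = (1 : Int) := rfl
        rw [← this, PySem.Int.band_natCast, Nat.and_one_is_mod]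
      have htn : (5 * (d : Int)).toNat = 5 * d := by omega
      have hd1 : ((d : Int) + 1) = ((d + 1 : Nat) : Int) := by push_cast; ring
      have h32 : (32 : ℕ) ^ d = 2 ^ (5 * d) := by
        rw [show (32 : ℕ) = 2 ^ 5 from rfl, ← pow_mul]
      have hmm : mask < 2 ^ (5 * d) := by omega
      have ihc := ih (n / 2) (Nat.div_lt_self (Nat.pos_of_ne_zero hn) (by omega))
      rcases Nat.mod_two_eq_zero_or_one n with h2 | h2
      · -- even: OR with 0 << …
        rw [hband, h2]
        rw [if_neg (by norm_num)]
        have hz : PySem.Int.bor (mask : Int) ((0 : Int) <<< (5 * (d : Int)).toNat) = (mask : Int) := by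
          have : ((0 : Int) <<< (5 * (d : Int)).toNat) = ((0 <<< (5 * (d : Int)).toNat : Nat) : Int) := by
            push_cast; rfl
          rw [this, PySem.Int.bor_natCast]
          simp
        rw [hz, hshift, hd1, ihc mask (d + 1) (by
          have : (32 : ℕ) ^ (d + 1) = 32 * 32 ^ d := by ring
          omega)]
        rw [pvSpread_eq n hn, h2]
        congr 1
        ring
      · -- odd: OR with 31 << (5*digit)
        rw [hband, h2]
        rw [if_pos (by norm_num)]
        have h31 : ((31 : Int) <<< (5 * (d : Int)).toNat) = ((31 <<< (5 * d) : Nat) : Int) := by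
          rw [htn]; push_cast; rfl
        have hor : PySem.Int.bor (mask : Int) ((31 : Int) <<< (5 * (d : Int)).toNat)
            = ((mask + 31 * 2 ^ (5 * d) : Nat) : Int) := by
          rw [h31, PySem.Int.bor_natCast, Nat.shiftLeft_eq, pv_lor_mul_pow (5 * d) mask 31 hmm]
        rw [hor, hshift, hd1, ihc (mask + 31 * 2 ^ (5 * d)) (d + 1) (by
          have h1 : (32 : ℕ) ^ (d + 1) = 32 * 32 ^ d := by ring
          omega)]
        rw [pvSpread_eq n hn, h2]
        congr 1
        rw [← h32]
        ring

lemma pv_foldB (n : Nat) (hn : 0 < n) : ∀ acc : Int,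
    (Nat.toDigits 2 n).foldl (fun mask c => mask * 32 + (if c = '1' then 31 else 0)) acc
      = acc * 32 ^ (Nat.toDigits 2 n).length + (pvSpread n : Int) := by
  induction n using Nat.strong_induction_on with
  | _ n ih =>
    intro acc
    rw [Nat.toDigits_eq_if (by norm_num)]
    by_cases hlt : n < 2
    · have h1 : n = 1 := by omega
      subst h1
      rw [if_pos (by norm_num)]
      have h31 : pvSpread 1 = 31 := by rw [pvSpread_eq 1 (by omega)]; simp [pvSpread]
      simp [List.foldl, Nat.digitChar, h31]
    · rw [if_neg hlt]
      have hpos : 0 < n / 2 := by omega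
      rw [List.foldl_append, ih (n / 2) (Nat.div_lt_self hn (by omega)) hpos acc]
      have hlen : (Nat.toDigits 2 (n / 2) ++ [(n % 2).digitChar]).length
          = (Nat.toDigits 2 (n / 2)).length + 1 := by simp
      rw [hlen, pvSpread_eq n (by omega)]
      rcases Nat.mod_two_eq_zero_or_one n with h2 | h2
      · simp [List.foldl, h2, Nat.digitChar]
        ring
      · simp [List.foldl, h2, Nat.digitChar]
        ring

lemma pv_toBinChars_pos (n : Nat) (hn : 0 < n) :
    PySem.Int.toBinChars (n : Int) = Nat.toDigits 2 n := by
  rw [PySem.Int.toBinChars]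
  rw [if_neg (by omega)]
  simp

-- ===== VERDICT (by name: the statement is the Claim_ definition above) =====
theorem newmask_spec : Claim_equal_newmask := by
  intro i _
  unfold Spec_newmask newmask newmask_alt
  by_cases hle : i ≤ 0
  · rw [if_pos hle, newmaskLoop, if_neg (by omega)]
  · rw [if_neg hle]
    have hpos : 0 < i := by omega
    obtain ⟨n, rfl⟩ : ∃ n : Nat, i = (n : Int) := ⟨i.toNat, by omega⟩
    have hn : 0 < n := by exact_mod_cast hpos
    have hA := pv_loopA n 0 0 (by norm_num)
    norm_num at hA
    rw [pv_toBinChars_pos n hn, pv_foldB n hn 0, hA]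
    ring
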